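-- pv_equiv track=rewrite | github.com/Steph7/codigos | PDC/Lista Exercícios 6/problema3.py | calcularMDC
-- ===== SOURCE A (Python) =====
-- def calcularMDC(lista1, lista2):
--     maior = None
--     multiplosComuns = []
--     for x in lista1:
--         for y in lista2:
--             if x == y:
--                 multiplosComuns.append(x)
--
--     for x in multiplosComuns:
--         if maior == None or x > maior:
--             maior = x
--     return maior
-- ===== SOURCE B (Python) =====
-- def calcularMDC(lista1, lista2):
--     s2 = set(lista2)
--     for x in sorted(lista1, reverse=True):
--         if x in s2:
--             return x
--     return None
-- ===== Notes on version B (the rewrite author's own statement) =====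
-- stated objective: faster
-- what changed: Replaces A's quadratic nested scan collecting all common elements plus a second max pass with a set of lista2 and a single early-terminating scan of lista1 sorted in descending order.
import Mathlib
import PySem

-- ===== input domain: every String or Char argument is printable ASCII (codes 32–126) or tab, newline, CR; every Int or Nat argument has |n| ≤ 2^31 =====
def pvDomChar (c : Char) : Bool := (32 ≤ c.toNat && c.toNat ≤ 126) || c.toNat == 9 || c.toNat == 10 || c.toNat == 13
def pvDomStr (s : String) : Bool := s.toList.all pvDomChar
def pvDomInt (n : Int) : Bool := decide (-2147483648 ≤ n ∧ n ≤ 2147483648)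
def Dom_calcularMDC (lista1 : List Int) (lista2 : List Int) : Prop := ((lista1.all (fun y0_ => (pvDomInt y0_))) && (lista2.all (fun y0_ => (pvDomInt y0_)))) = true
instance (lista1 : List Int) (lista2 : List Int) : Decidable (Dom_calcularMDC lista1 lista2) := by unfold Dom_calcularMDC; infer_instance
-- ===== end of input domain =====

-- B replaces A's quadratic nested common-element collection + max pass with a set of lista2
-- and a single early-terminating scan of lista1 sorted descending (faster; see claim).


-- ===== PORT A =====
def calcularMDC (lista1 : List Int) (lista2 : List Int) : Option Int :=
  -- maior = None; multiplosComuns = []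
  -- for x in lista1: for y in lista2: if x == y: multiplosComuns.append(x)
  let multiplosComuns : List Int :=
    lista1.foldl (fun acc x =>
      lista2.foldl (fun acc2 y => if x == y then acc2 ++ [x] else acc2) acc) []
  -- for x in multiplosComuns: if maior == None or x > maior: maior = x
  multiplosComuns.foldl (fun maior x =>
    match maior with
    | none => some x
    | some m => if x > m then some x else some m) none

-- ===== PORT B =====
-- B: s2 = set(lista2); first x of sorted(lista1, reverse=True) with x in s2, else None.
def calcularMDC_alt (lista1 : List Int) (lista2 : List Int) : Option Int :=
  let s2 : PySem.Set Int := PySem.Set.ofList lista2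
  (PySem.List.sorted lista1 (fun x => x) true).find? (fun x => PySem.Set.contains s2 x)

-- ===== PRECONDITION & SPEC =====
def Spec_calcularMDC (lista1 : List Int) (lista2 : List Int) (out : Option Int) : Prop := out = calcularMDC_alt lista1 lista2
instance (lista1 : List Int) (lista2 : List Int) (out : Option Int) : Decidable (Spec_calcularMDC lista1 lista2 out) := by unfold Spec_calcularMDC; infer_instance

-- ===== CLAIM (what is proved, stated in full; the proofs are below) =====
def Claim_equal_calcularMDC : Prop := ∀ (lista1 : List Int) (lista2 : List Int), Dom_calcularMDC lista1 lista2 → Spec_calcularMDC lista1 lista2 (calcularMDC lista1 lista2)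

-- ===== LEMMAS AND PROOFS =====

-- the running-max step of A's second loop
def pvStep (m : Option Int) (x : Int) : Option Int :=
  match m with
  | none => some x
  | some a => if x > a then some x else some a

-- the combined step: take x into the running max iff p x
def pvStep' (p : Int → Bool) (m : Option Int) (x : Int) : Option Int :=
  if p x then pvStep m x else m

lemma pvStep_eq (m : Option Int) (x : Int) :
    pvStep m x = some (m.elim x (fun a => max a x)) := by
  cases m with
  | none => rfl
  | some a =>
      simp only [pvStep, Option.elim]
      split_ifs <;> (congr 1; omega)

lemma pvStep_idem (m : Option Int) (x : Int) : pvStep (pvStep m x) x = pvStep m x := by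
  cases m <;> simp [pvStep_eq]

lemma pvStep'_comm (p : Int → Bool) (m : Option Int) (x y : Int) :
    pvStep' p (pvStep' p m x) y = pvStep' p (pvStep' p m y) x := by
  unfold pvStep'
  split_ifs with h1 h2 h2
  · cases m with
    | none => simp only [pvStep_eq, Option.elim, Option.some.injEq]; omega
    | some a => simp only [pvStep_eq, Option.elim, Option.some.injEq]; omega
  all_goals rfl

-- folding pvStep over a constant-x list is one pvStep when nonempty
lemma foldl_pvStep_const {β : Type} (l : List β) (x : Int) (m : Option Int) :
    (l.map (fun _ => x)).foldl pvStep m = if l = [] then m else pvStep m x := by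
  induction l generalizing m with
  | nil => rfl
  | cons b t ih =>
      rw [List.map_cons, List.foldl_cons, ih]
      split_ifs <;> simp_all [pvStep_idem]

-- A's first (nested) loop collects, per x of the outer list, one copy of x per equal y of lista2
lemma pvCollect_eq (lista2 : List Int) (l : List Int) (acc : List Int) :
    l.foldl (fun acc x =>
        lista2.foldl (fun acc2 y => if x == y then acc2 ++ [x] else acc2) acc) acc
      = acc ++ l.flatMap (fun x => (lista2.filter (fun y => x == y)).map (fun _ => x)) := by
  induction l generalizing acc with
  | nil => simp
  | cons x t ih =>
      rw [List.foldl_cons, PySem.List.foldl_append_if (fun y => x == y) (fun _ => x), ih]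
      simp

-- A's second loop over the collected common elements = one pvStep'-fold over the outer list
lemma foldl_pvStep_flatMap (lista2 : List Int) (l : List Int) (m : Option Int) :
    (l.flatMap (fun x => (lista2.filter (fun y => x == y)).map (fun _ => x))).foldl pvStep m
      = l.foldl (pvStep' (fun x => PySem.Set.contains (PySem.Set.ofList lista2) x)) m := by
  induction l generalizing m with
  | nil => rfl
  | cons x t ih =>
      simp only [List.flatMap_cons, List.foldl_append, List.foldl_cons]
      rw [foldl_pvStep_const, ih]
      congr 1
      by_cases hx : x ∈ lista2
      · have hne : lista2.filter (fun y => x == y) ≠ [] := by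
          simp only [ne_eq, List.filter_eq_nil_iff]
          intro h
          exact h x hx (by simp)
        simp [pvStep', hne, hx]
      · have he : lista2.filter (fun y => x == y) = [] := by
          simp only [List.filter_eq_nil_iff]
          intro a ha h
          exact hx (by simpa using (beq_iff_eq.mp h ▸ ha))
        simp [pvStep', he, hx]

-- a pvStep'-fold started at some h, over elements all ≤ h, stays some h
lemma foldl_pvStep'_dominated (p : Int → Bool) (t : List Int) (h : Int)
    (hle : ∀ y ∈ t, y ≤ h) :
    t.foldl (pvStep' p) (some h) = some h := by
  induction t with
  | nil => rfl
  | cons y t ih =>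
      have hy : y ≤ h := hle y (by simp)
      have hstep : pvStep' p (some h) y = some h := by
        simp only [pvStep', pvStep_eq, Option.elim]
        split_ifs <;> simp [max_eq_left hy]
      rw [List.foldl_cons, hstep, ih (fun z hz => hle z (by simp [hz]))]

-- on a descending list, find? equals the pvStep'-fold
lemma find_eq_foldl_of_desc (p : Int → Bool) (d : List Int)
    (hd : d.Pairwise (fun a b => b ≤ a)) :
    d.find? p = d.foldl (pvStep' p) none := by
  induction d with
  | nil => rfl
  | cons h t ih =>
      rcases List.pairwise_cons.mp hd with ⟨hle, ht⟩
      by_cases hp : p h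
      · rw [List.find?_cons_of_pos hp, List.foldl_cons]
        show some h = t.foldl (pvStep' p) (pvStep' p none h)
        rw [show pvStep' p none h = some h by simp [pvStep', hp, pvStep]]
        exact (foldl_pvStep'_dominated p t h hle).symm
      · rw [List.find?_cons_of_neg (by simp [hp]), List.foldl_cons]
        rw [show pvStep' p none h = none by simp [pvStep', hp]]
        exact ih ht

-- ===== VERDICT (by name: the statement is the Claim_ definition above) =====
theorem calcularMDC_spec : Claim_equal_calcularMDC := by
  intro lista1 lista2 _
  unfold Spec_calcularMDC calcularMDC calcularMDC_alt
  rw [pvCollect_eq, List.nil_append]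
  rw [show (fun (maior : Option Int) (x : Int) => match maior with
        | none => some x
        | some m => if x > m then some x else some m) = pvStep from rfl]
  rw [foldl_pvStep_flatMap, find_eq_foldl_of_desc _ _ (by
    simpa using PySem.List.sorted_pairwise_rev lista1 (fun x => x))]
  exact List.Perm.foldl_eq'
    (PySem.List.sorted_perm lista1 (fun x => x) true).symm
    (fun x _ y _ z =>
      pvStep'_comm (fun x => PySem.Set.contains (PySem.Set.ofList lista2) x) z x y) none
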